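-- pv_equiv track=rewrite | github.com/jahirulislammolla/CodeFights | Fights/maxGCD.py | maxGCD
-- ===== SOURCE A (Python) =====
-- def maxGCD(sequence):
--     def gcd(a, b):
--         if b == 0:
--             return a
--         return gcd(b, a % b)
--
--     bestRes = 0
--
--     for i in range(len(sequence)):
--         result = sequence[0]
--         if i == 0:
--             result = sequence[1]
--         for j in range(len(sequence)):
--             if i == j:
--                 continue
--             result = gcd(result, sequence[j])
--         if result > bestRes:
--             bestRes = result
--
--     return bestRes
-- ===== SOURCE B (Python) =====
-- def maxGCD(sequence):
--     def gcd(a, b):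
--         if b == 0:
--             return a
--         return gcd(b, a % b)
--
--     n = len(sequence)
--     prefix = [0] * (n + 1)
--     for i in range(n):
--         prefix[i + 1] = gcd(prefix[i], sequence[i])
--     suffix = [0] * (n + 1)
--     for i in range(n - 1, -1, -1):
--         suffix[i] = gcd(sequence[i], suffix[i + 1])
--     best = 0
--     for i in range(n):
--         cand = gcd(prefix[i], suffix[i + 1])
--         if cand > best:
--             best = cand
--     return best
-- ===== Notes on version B (the rewrite author's own statement) =====
-- stated objective: faster
-- what changed: A recomputes the gcd of all n-1 remaining elements from scratch for each excluded index (nested loops); B builds prefix and suffix gcd arrays once and combines prefix[i] with suffix[i+1] per index.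
import Mathlib
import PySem

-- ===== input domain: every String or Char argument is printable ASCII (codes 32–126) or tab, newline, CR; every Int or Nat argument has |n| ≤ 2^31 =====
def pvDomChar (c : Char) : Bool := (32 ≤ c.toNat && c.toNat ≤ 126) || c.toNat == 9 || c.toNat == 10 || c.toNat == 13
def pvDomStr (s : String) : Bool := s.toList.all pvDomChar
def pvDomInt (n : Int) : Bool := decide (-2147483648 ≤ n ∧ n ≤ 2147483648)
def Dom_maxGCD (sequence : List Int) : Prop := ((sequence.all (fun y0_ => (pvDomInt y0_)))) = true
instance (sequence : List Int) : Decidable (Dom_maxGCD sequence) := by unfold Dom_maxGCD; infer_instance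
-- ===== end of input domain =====

-- B replaces A's per-index rescan of the whole list by prefix/suffix gcd arrays combined once per excluded index.

-- ===== PORT A =====
-- Python's recursive gcd(a, b) with floor-division remainder (helper defined identically in both sources)
def pyGcd (a b : Int) : Int :=
  if h : b = 0 then a else pyGcd b (PySem.Int.mod a b)
termination_by b.natAbs
decreasing_by
  rcases lt_trichotomy 0 b with hb | hb | hb
  · have h1 := PySem.Int.mod_nonneg a hb
    have h2 := PySem.Int.mod_lt a hb
    omega
  · exact absurd hb.symm h
  · have h3 := PySem.Int.mod_neg_bounds a hb
    omega

def maxGCD (sequence : List Int) : Int :=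
  (PySem.List.pyRange 0 (sequence.length : Int) 1).foldl (fun bestRes i =>
    let seed : Int :=
      if i = 0 then PySem.List.pyGetD sequence 1 0 else PySem.List.pyGetD sequence 0 0
    let result :=
      (PySem.List.pyRange 0 (sequence.length : Int) 1).foldl
        (fun r j => if i = j then r else pyGcd r (PySem.List.pyGetD sequence j 0)) seed
    if result > bestRes then result else bestRes) 0

-- ===== PORT B =====
-- suffix array of Source B: suffix[i] = gcd(sequence[i], suffix[i+1]), built back-to-front
def sufList : List Int → List Int
  | [] => [0]
  | x :: xs => pyGcd x ((sufList xs).headD 0) :: sufList xs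

def maxGCD_alt (sequence : List Int) : Int :=
  let pre := List.scanl pyGcd 0 sequence
  let suf := sufList sequence
  (PySem.List.pyRange 0 (sequence.length : Int) 1).foldl (fun best i =>
    let cand := pyGcd (PySem.List.pyGetD pre i 0) (PySem.List.pyGetD suf (i + 1) 0)
    if cand > best then cand else best) 0

-- ===== PRECONDITION & SPEC =====
-- Pre_ excludes exactly the singleton lists, on which A raises IndexError (sequence[1]).
def Pre_maxGCD (sequence : List Int) : Prop := sequence.length ≠ 1
instance (sequence : List Int) : Decidable (Pre_maxGCD sequence) := by unfold Pre_maxGCD; infer_instance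
def pvWitness_maxGCD : List Int := [6, 9, 15]

def Spec_maxGCD (sequence : List Int) (out : Int) : Prop := out = maxGCD_alt sequence
instance (sequence : List Int) (out : Int) : Decidable (Spec_maxGCD sequence out) := by unfold Spec_maxGCD; infer_instance

-- ===== CLAIM (what is proved, stated in full; the proofs are below) =====
def Claim_equal_maxGCD : Prop := ∀ (sequence : List Int), Dom_maxGCD sequence → Pre_maxGCD sequence → Spec_maxGCD sequence (maxGCD sequence)

-- ===== LEMMAS AND PROOFS =====

theorem pyGcd_eq (a b : Int) : pyGcd a b = if b = 0 then a else b.sign * (Int.gcd a b : Int) := by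
  by_cases hb : b = 0
  · simp [pyGcd, hb]
  · rw [pyGcd]
    simp only [hb, if_false]
    have hmod : PySem.Int.mod a b = a + (-(PySem.Int.floordiv a b)) * b := by
      have := PySem.Int.floordiv_mul_add_mod a b
      linarith
    have hgcd : Int.gcd b (PySem.Int.mod a b) = Int.gcd a b := by
      rw [hmod, Int.gcd_add_mul_right_right, Int.gcd_comm]
    by_cases hm : PySem.Int.mod a b = 0
    · -- pyGcd b 0 = b; show b = b.sign * gcd a b
      rw [pyGcd_eq b _, if_pos hm]
      have hdvd : b ∣ a := (PySem.Int.mod_eq_zero_iff_dvd a b).mp hm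
      have h4 : Int.gcd a b = b.natAbs := by
        rw [Int.gcd_comm]; exact Int.gcd_eq_natAbs_left hdvd
      rw [h4, Int.sign_mul_natAbs]
      simp
    · rw [pyGcd_eq b _]
      simp only [hm, if_false]
      have hsign : (PySem.Int.mod a b).sign = b.sign := by
        rcases lt_trichotomy 0 b with h1 | h1 | h1
        · have := PySem.Int.mod_nonneg a h1
          have hpos : 0 < PySem.Int.mod a b := lt_of_le_of_ne this (Ne.symm hm)
          rw [Int.sign_eq_one_of_pos hpos, Int.sign_eq_one_of_pos h1]
        · exact absurd h1.symm hb
        · have := PySem.Int.mod_neg_bounds a h1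
          have hneg : PySem.Int.mod a b < 0 := lt_of_le_of_ne this.2 hm
          rw [Int.sign_eq_neg_one_of_neg hneg, Int.sign_eq_neg_one_of_neg h1]
      rw [hsign, hgcd]
      simp
termination_by b.natAbs
decreasing_by
  all_goals
    rcases lt_trichotomy 0 b with hb1 | hb1 | hb1
    · have h1 := PySem.Int.mod_nonneg a hb1
      have h2 := PySem.Int.mod_lt a hb1
      omega
    · exact absurd hb1.symm hb
    · have h3 := PySem.Int.mod_neg_bounds a hb1
      omega

theorem pyGcd_zero_right (a : Int) : pyGcd a 0 = a := by
  rw [pyGcd]; rfl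

theorem pyGcd_zero_left (a : Int) : pyGcd 0 a = a := by
  rw [pyGcd_eq]
  by_cases ha : a = 0
  · simp [ha]
  · rw [if_neg ha]
    simpa using Int.sign_mul_natAbs a

theorem pyGcd_self (a : Int) : pyGcd a a = a := by
  rw [pyGcd_eq]
  by_cases ha : a = 0
  · simp [ha]
  · rw [if_neg ha, Int.gcd_self]
    exact Int.sign_mul_natAbs a

theorem sign_cases_aux (b : Int) (hb : b ≠ 0) : b.sign = 1 ∧ 0 < b ∨ b.sign = -1 ∧ b < 0 := by
  rcases lt_trichotomy 0 b with h | h | h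
  · exact Or.inl ⟨Int.sign_eq_one_of_pos h, h⟩
  · exact absurd h.symm hb
  · exact Or.inr ⟨Int.sign_eq_neg_one_of_neg h, h⟩

theorem pyGcd_assoc (a b c : Int) : pyGcd (pyGcd a b) c = pyGcd a (pyGcd b c) := by
  by_cases hc : c = 0
  · simp [hc, pyGcd_zero_right]
  by_cases hb : b = 0
  · simp [hb, pyGcd_zero_right, pyGcd_zero_left]
  · have hgab : Int.gcd a b ≠ 0 := by simp [Int.gcd_eq_zero_iff, hb]
    have hgbc : Int.gcd b c ≠ 0 := by simp [Int.gcd_eq_zero_iff, hb]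
    have hab : pyGcd a b = b.sign * (Int.gcd a b : Int) := by rw [pyGcd_eq, if_neg hb]
    have hbc : pyGcd b c = c.sign * (Int.gcd b c : Int) := by rw [pyGcd_eq, if_neg hc]
    have hbc0 : pyGcd b c ≠ 0 := by
      rw [hbc]
      rcases sign_cases_aux c hc with ⟨h, _⟩ | ⟨h, _⟩ <;> rw [h] <;> simpa using hgbc
    rw [hab, pyGcd_eq _ c, if_neg hc, pyGcd_eq a _, if_neg hbc0]
    have h1 : (b.sign * (Int.gcd a b : Int)).natAbs = Int.gcd a b := by
      rcases sign_cases_aux b hb with ⟨h, _⟩ | ⟨h, _⟩ <;> rw [h] <;> simp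
    have h3 : (c.sign * (Int.gcd b c : Int)).sign = c.sign := by
      have hpos : (0 : Int) < (Int.gcd b c : Int) := by exact_mod_cast Nat.pos_of_ne_zero hgbc
      rcases sign_cases_aux c hc with ⟨h, _⟩ | ⟨h, _⟩ <;> rw [h]
      · rw [one_mul, Int.sign_eq_one_of_pos hpos]
      · rw [neg_one_mul, Int.sign_neg, Int.sign_eq_one_of_pos hpos]
    rw [hbc] at *
    rw [h3]
    have h2 : (c.sign * (Int.gcd b c : Int)).natAbs = Int.gcd b c := by
      rcases sign_cases_aux c hc with ⟨h, _⟩ | ⟨h, _⟩ <;> rw [h] <;> simp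
    simp only [Int.gcd] at h1 h2 ⊢
    rw [h1, h2, Nat.gcd_assoc]

theorem pyGcd_left_idem (x y : Int) : pyGcd x (pyGcd x y) = pyGcd x y := by
  rw [← pyGcd_assoc, pyGcd_self]

def gcdF (xs : List Int) : Int := xs.foldl pyGcd 0

theorem foldl_pyGcd_eq (l : List Int) (a : Int) : l.foldl pyGcd a = pyGcd a (gcdF l) := by
  induction l generalizing a with
  | nil => simp [gcdF, pyGcd_zero_right]
  | cons x t ih =>
    show (t.foldl pyGcd (pyGcd a x)) = pyGcd a (gcdF (x :: t))
    rw [ih (pyGcd a x)]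
    have : gcdF (x :: t) = pyGcd x (gcdF t) := by
      show (t.foldl pyGcd (pyGcd 0 x)) = pyGcd x (gcdF t)
      rw [pyGcd_zero_left, ih x]
    rw [this, pyGcd_assoc]

theorem gcdF_cons (x : Int) (t : List Int) : gcdF (x :: t) = pyGcd x (gcdF t) := by
  show (t.foldl pyGcd (pyGcd 0 x)) = pyGcd x (gcdF t)
  rw [pyGcd_zero_left, foldl_pyGcd_eq]

theorem scanl_getD (s : List Int) (b : Int) (k : Nat) (hk : k ≤ s.length) :
    (List.scanl pyGcd b s).getD k 0 = (s.take k).foldl pyGcd b := by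
  induction s generalizing b k with
  | nil =>
    have : k = 0 := by simpa using hk
    subst this; simp
  | cons x xs ih =>
    cases k with
    | zero => simp [List.scanl_cons]
    | succ k =>
      rw [List.scanl_cons, List.getD_cons_succ, List.take_succ_cons, List.foldl_cons]
      exact ih (pyGcd b x) k (by simpa using hk)

theorem sufList_headD (s : List Int) : (sufList s).headD 0 = gcdF s := by
  induction s with
  | nil => simp [sufList, gcdF]
  | cons x xs ih =>
    show pyGcd x ((sufList xs).headD 0) = gcdF (x :: xs)
    rw [ih, gcdF_cons]

theorem sufList_getD (s : List Int) (k : Nat) (hk : k ≤ s.length) :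
    (sufList s).getD k 0 = gcdF (s.drop k) := by
  induction s generalizing k with
  | nil =>
    have : k = 0 := by simpa using hk
    subst this; simp [sufList, gcdF]
  | cons x xs ih =>
    cases k with
    | zero =>
      show pyGcd x ((sufList xs).headD 0) = gcdF (List.drop 0 (x :: xs))
      rw [sufList_headD, List.drop_zero, gcdF_cons]
    | succ k =>
      simp only [sufList, List.getD_cons_succ, List.drop_succ_cons]
      exact ih k (by simpa using hk)

theorem gcdF_nil : gcdF [] = 0 := rfl

theorem seed_absorb (s : List Int) (hpre : s.length ≠ 1) (k : Nat) (hk : k < s.length) :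
    pyGcd (pyGcd (if (k : Int) = 0 then PySem.List.pyGetD s 1 0 else PySem.List.pyGetD s 0 0)
      (gcdF (s.take k))) (gcdF (s.drop (k + 1)))
    = pyGcd (gcdF (s.take k)) (gcdF (s.drop (k + 1))) := by
  cases s with
  | nil => simp at hk
  | cons x t =>
    by_cases hk0 : k = 0
    · subst hk0
      cases t with
      | nil => simp at hpre
      | cons y r =>
        have e1 : PySem.List.pyGetD (x :: y :: r) 1 0 = y := by
          rw [PySem.List.pyGetD_ofNat']; rfl
        rw [if_pos (by norm_num), e1]
        simp only [List.take_zero, gcdF_nil, pyGcd_zero_right, pyGcd_zero_left,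
          List.drop_succ_cons, List.drop_zero, gcdF_cons]
        exact pyGcd_left_idem y (gcdF r)
    · have : ¬ ((k : Int) = 0) := by exact_mod_cast hk0
      rw [if_neg this, PySem.List.pyGetD_zero, List.getD_cons_zero]
      obtain ⟨k', rfl⟩ : ∃ k', k = k' + 1 := ⟨k - 1, by omega⟩
      rw [List.take_succ_cons, gcdF_cons, pyGcd_left_idem]

theorem inner_eq (s : List Int) (hpre : s.length ≠ 1) (i : Int) (h0 : 0 ≤ i)
    (hn : i < (s.length : Int)) :
    (PySem.List.pyRange 0 (s.length : Int) 1).foldl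
      (fun r j => if i = j then r else pyGcd r (PySem.List.pyGetD s j 0))
      (if i = 0 then PySem.List.pyGetD s 1 0 else PySem.List.pyGetD s 0 0)
    = pyGcd (PySem.List.pyGetD (List.scanl pyGcd 0 s) i 0)
        (PySem.List.pyGetD (sufList s) (i + 1) 0) := by
  have hik : i = (i.toNat : Int) := (Int.toNat_of_nonneg h0).symm
  set k := i.toNat with hkdef
  have hkn : k < s.length := by omega
  -- right-hand side: prefix and suffix gcds
  have hrhs : pyGcd (PySem.List.pyGetD (List.scanl pyGcd 0 s) i 0)
      (PySem.List.pyGetD (sufList s) (i + 1) 0)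
      = pyGcd (gcdF (s.take k)) (gcdF (s.drop (k + 1))) := by
    have h1 : i + 1 = ((k + 1 : Nat) : Int) := by omega
    rw [h1, hik, PySem.List.pyGetD_natCast, PySem.List.pyGetD_natCast,
      scanl_getD s 0 k (by omega), sufList_getD s (k + 1) (by omega)]
    rfl
  rw [hrhs]
  -- split the range at i and i+1
  rw [PySem.List.pyRange_one_append 0 i (s.length : Int) h0 (le_of_lt hn),
    PySem.List.pyRange_one_append i (i + 1) (s.length : Int) (by omega) (by omega),
    PySem.List.pyRange_one_singleton, List.foldl_append, List.foldl_append]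
  -- middle element i: skipped
  simp only [List.foldl_cons, List.foldl_nil, if_true]
  -- left segment: fold over take k
  have hget : ∀ j : Int, 0 ≤ j → j < i → PySem.List.pyGetD s j 0 = PySem.List.pyGetD (s.take k) j 0 := by
    intro j hj0 hji
    have hj' : j = (j.toNat : Int) := (Int.toNat_of_nonneg hj0).symm
    rw [hj', PySem.List.pyGetD_natCast, PySem.List.pyGetD_natCast,
      List.getD_eq_getElem _ _ (by omega), List.getD_eq_getElem _ _ (by simp only [List.length_take]; omega)]
    exact (List.getElem_take).symm
  have hleft : ∀ (seed : Int),
      (PySem.List.pyRange 0 i 1).foldl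
        (fun r j => if i = j then r else pyGcd r (PySem.List.pyGetD s j 0)) seed
      = (s.take k).foldl pyGcd seed := by
    intro seed
    rw [PySem.List.foldl_congr_mem _ _ (fun r j => pyGcd r (PySem.List.pyGetD (s.take k) j 0)) _
      (by
        intro acc j hj
        rw [PySem.List.mem_pyRange_one] at hj
        rw [if_neg (by omega), hget j hj.1 hj.2])]
    have hlen : i = ((s.take k).length : Int) := by simp; omega
    rw [hlen, PySem.List.foldl_pyRange_pyGetD' _ _ _ _ (le_refl 0)]
    simp
  rw [hleft]
  -- right segment: fold over drop (k+1)
  rw [PySem.List.foldl_congr_mem _ _ (fun r j => pyGcd r (PySem.List.pyGetD s j 0)) _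
    (by
      intro acc j hj
      rw [PySem.List.mem_pyRange_one] at hj
      rw [if_neg (by omega)])]
  rw [PySem.List.foldl_pyRange_pyGetD' _ _ _ _ (by omega : (0:Int) ≤ i + 1)]
  have hdrop : (i + 1).toNat = k + 1 := by omega
  rw [hdrop, foldl_pyGcd_eq, foldl_pyGcd_eq]
  rw [show i = ((k : Nat) : Int) from hik]
  exact seed_absorb s hpre k hkn

theorem maxGCD_eq (s : List Int) (hpre : s.length ≠ 1) : maxGCD s = maxGCD_alt s := by
  unfold maxGCD maxGCD_alt
  dsimp only
  apply PySem.List.foldl_congr_mem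
  intro acc i hi
  rw [PySem.List.mem_pyRange_one] at hi
  rw [inner_eq s hpre i hi.1 hi.2]

-- ===== VERDICT (by name: the statement is the Claim_ definition above) =====
theorem maxGCD_spec : Claim_equal_maxGCD := by
  intro s _ hpre
  unfold Spec_maxGCD
  exact maxGCD_eq s hpre
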